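-- pv_equiv track=rewrite | github.com/Alichev/GBpython | Homeworks/Homework3/Task05-NegativeFibonacci.py | NegativeFibonacci
-- ===== SOURCE A (Python) =====
-- def NegativeFibonacci(n):
--     if n == 1:
--         return 1
--     elif n == 2:
--         return -1
--     else:
--         num1, num2 = 1, -1
--         for i in range(2, n):
--             num1, num2 = num2, num1 - num2
--         return num2
-- ===== SOURCE B (Python) =====
-- def NegativeFibonacci(n):
--     # Fast-doubling Fibonacci with the negative-index sign rule F(-n) = (-1)^(n+1) * F(n).
--     if n < 3:
--         return 1 if n == 1 else -1
--     def fib_pair(k):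
--         # returns (F(k), F(k+1)) for k >= 0
--         if k == 0:
--             return (0, 1)
--         a, b = fib_pair(k // 2)
--         c = a * (2 * b - a)
--         d = a * a + b * b
--         if k % 2:
--             return (d, c + d)
--         return (c, d)
--     f = fib_pair(n)[0]
--     return f if n % 2 else -f
-- ===== Notes on version B (the rewrite author's own statement) =====
-- stated objective: faster
-- what changed: Replaced the linear addition loop by recursive fast doubling (F(2k), F(2k+1) from F(k), F(k+1)) with the sign rule F(-n) = (-1)^(n+1)F(n), keeping A's constant-time answers for n < 3.
import Mathlib
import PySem

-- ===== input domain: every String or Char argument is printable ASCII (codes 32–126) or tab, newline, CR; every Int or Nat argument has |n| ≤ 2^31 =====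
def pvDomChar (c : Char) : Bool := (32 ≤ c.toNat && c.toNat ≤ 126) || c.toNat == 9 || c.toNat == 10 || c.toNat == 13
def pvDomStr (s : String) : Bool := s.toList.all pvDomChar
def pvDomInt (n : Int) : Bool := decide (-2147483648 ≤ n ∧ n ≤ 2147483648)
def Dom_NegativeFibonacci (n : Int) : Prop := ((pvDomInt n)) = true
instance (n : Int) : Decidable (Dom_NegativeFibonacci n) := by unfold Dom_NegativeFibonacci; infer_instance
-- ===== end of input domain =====

-- B replaces A's linear addition loop by recursive fast doubling with the sign rule F(-n) = (-1)^(n+1)F(n): asymptotically fewer big-int operations.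

-- ===== PORT A =====
def NegativeFibonacci (n : Int) : Int :=
  if n == 1 then 1
  else if n == 2 then -1
  else
    ((PySem.List.pyRange 2 n 1).foldl
      (fun (p : Int × Int) _ => (p.2, p.1 - p.2)) (1, -1)).2

-- ===== PORT B =====
-- fib_pair k = (F(k), F(k+1)) by fast doubling; B only ever calls it on the
-- nonnegative argument m = |n|, so it is ported on Nat.
def fibPair (k : Nat) : Int × Int :=
  if h : k = 0 then (0, 1)
  else
    let p := fibPair (k / 2)
    let a := p.1
    let b := p.2
    let c := a * (2 * b - a)
    let d := a * a + b * b
    if k % 2 = 1 then (d, c + d) else (c, d)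
decreasing_by exact Nat.div_lt_self (Nat.pos_of_ne_zero h) (by norm_num)

def NegativeFibonacci_alt (n : Int) : Int :=
  if n < 3 then (if n == 1 then 1 else -1)
  else
    let f := (fibPair n.toNat).1
    if PySem.Int.mod n 2 == 1 then f else -f

-- ===== PRECONDITION & SPEC =====
def Spec_NegativeFibonacci (n : Int) (out : Int) : Prop := out = NegativeFibonacci_alt n
instance (n : Int) (out : Int) : Decidable (Spec_NegativeFibonacci n out) := by unfold Spec_NegativeFibonacci; infer_instance

-- ===== CLAIM (what is proved, stated in full; the proofs are below) =====
def Claim_equal_NegativeFibonacci : Prop := ∀ (n : Int), Dom_NegativeFibonacci n → Spec_NegativeFibonacci n (NegativeFibonacci n)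

-- ===== LEMMAS AND PROOFS =====

-- definitional unfolding of the B port (zeta-reduced form)
theorem alt_eval (n : Int) : NegativeFibonacci_alt n =
    (if n < 3 then (if n == 1 then 1 else -1)
     else if (PySem.Int.mod n 2 == 1) = true
       then (fibPair n.toNat).1
       else -(fibPair n.toNat).1) := rfl

theorem fib_cast_two_mul (q : Nat) :
    ((Nat.fib (2*q) : Int)) = (Nat.fib q : Int) * (2 * (Nat.fib (q+1) : Int) - (Nat.fib q : Int)) := by
  have hle : Nat.fib q ≤ 2 * Nat.fib (q+1) := by
    have := @Nat.fib_le_fib_succ q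
    omega
  have h := Nat.fib_two_mul q
  zify [hle] at h
  linarith

theorem fib_cast_two_mul_add_one (q : Nat) :
    ((Nat.fib (2*q+1) : Int)) = (Nat.fib q : Int) * (Nat.fib q : Int) + (Nat.fib (q+1) : Int) * (Nat.fib (q+1) : Int) := by
  have h := Nat.fib_two_mul_add_one q
  zify at h
  rw [h]; ring

-- the fast-doubling helper computes (F k, F (k+1))
theorem fibPair_eq (k : Nat) : fibPair k = ((Nat.fib k : Int), (Nat.fib (k+1) : Int)) := by
  induction k using Nat.strong_induction_on with
  | _ k ih =>
    rw [fibPair.eq_def]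
    by_cases h : k = 0
    · subst h; norm_num
    · have hlt : k / 2 < k := Nat.div_lt_self (Nat.pos_of_ne_zero h) (by norm_num)
      rw [dif_neg h, ih (k/2) hlt]
      dsimp only
      set q := k / 2 with hq
      rcases Nat.mod_two_eq_zero_or_one k with hm | hm
      · rw [if_neg (by omega)]
        simp only [Prod.mk.injEq]
        refine ⟨?_, ?_⟩
        · rw [show k = 2*q by omega, fib_cast_two_mul]
        · rw [show k + 1 = 2*q+1 by omega, fib_cast_two_mul_add_one]
      · rw [if_pos hm]
        simp only [Prod.mk.injEq]
        refine ⟨?_, ?_⟩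
        · rw [show k = 2*q+1 by omega, fib_cast_two_mul_add_one]
        · rw [show k + 1 = 2*q+2 by omega]
          have hsum : (Nat.fib (2*q+2) : Int) = (Nat.fib (2*q) : Int) + (Nat.fib (2*q+1) : Int) := by
            rw [Nat.fib_add_two]; push_cast; ring
          rw [hsum, fib_cast_two_mul, fib_cast_two_mul_add_one]

-- signed negative-index Fibonacci: negFib k = F(-k) = (-1)^(k+1) F(k)
def negFib (k : Nat) : Int := (-1) ^ (k + 1) * (Nat.fib k : Int)

def stepAB (p : Int × Int) : Int × Int := (p.2, p.1 - p.2)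

theorem negFib_rec (m : Nat) : negFib (m+3) = negFib (m+1) - negFib (m+2) := by
  have h : (Nat.fib (m+3) : Int) = (Nat.fib (m+1) : Int) + (Nat.fib (m+2) : Int) := by
    rw [show m+3 = (m+1)+2 by omega, Nat.fib_add_two]; push_cast; ring
  have p2 : ((-1:Int))^(m+2) = (-1)^m := by
    rw [show m+2 = m+1+1 by omega, pow_succ, pow_succ]; ring
  have p3 : ((-1:Int))^(m+3) = -(-1)^m := by
    rw [show m+3 = m+1+1+1 by omega, pow_succ, pow_succ, pow_succ]; ring
  have p4 : ((-1:Int))^(m+4) = (-1)^m := by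
    rw [show m+4 = m+1+1+1+1 by omega, pow_succ, pow_succ, pow_succ, pow_succ]; ring
  simp only [negFib]
  rw [show m+3+1 = m+4 by omega, show m+1+1 = m+2 by omega, show m+2+1 = m+3 by omega,
     p2, p3, p4, h]
  ring

theorem negFib_odd (k : Nat) (h : k % 2 = 1) : negFib k = (Nat.fib k : Int) := by
  have he : Even (k+1) := Nat.even_iff.mpr (by omega)
  simp [negFib, he.neg_one_pow]

theorem negFib_even (k : Nat) (h : k % 2 = 0) : negFib k = -(Nat.fib k : Int) := by
  have ho : Odd (k+1) := Nat.odd_iff.mpr (by omega)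
  simp [negFib, ho.neg_one_pow]

theorem foldl_const_step (l : List Int) (s : Int × Int) :
    l.foldl (fun (p : Int × Int) _ => (p.2, p.1 - p.2)) s = stepAB^[l.length] s := by
  induction l generalizing s with
  | nil => rfl
  | cons x t ih =>
    rw [List.foldl_cons, List.length_cons, Function.iterate_succ_apply]
    exact ih (stepAB s)

theorem iterate_stepAB (m : Nat) : stepAB^[m] (1, -1) = (negFib (m+1), negFib (m+2)) := by
  induction m with
  | zero => simp [negFib, Nat.fib_one, Nat.fib_two]
  | succ m ih =>
    rw [Function.iterate_succ_apply', ih]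
    simp only [stepAB]
    rw [show m+1+2 = m+3 by omega, negFib_rec, show m+1+1 = m+2 by omega]

theorem A_eq_negFib (n : Int) (h : 1 ≤ n) : NegativeFibonacci n = negFib n.toNat := by
  by_cases h1 : n = 1
  · subst h1; decide
  · by_cases h2 : n = 2
    · subst h2; decide
    · unfold NegativeFibonacci
      rw [if_neg (by simp only [beq_iff_eq]; omega), if_neg (by simp only [beq_iff_eq]; omega),
         foldl_const_step, PySem.List.length_pyRange_one, iterate_stepAB]
      show negFib ((n-2).toNat + 2) = negFib n.toNat
      rw [show (n-2).toNat + 2 = n.toNat by omega]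

theorem B_eq_negFib (n : Int) (h : 3 ≤ n) : NegativeFibonacci_alt n = negFib n.toNat := by
  rw [alt_eval, if_neg (by omega : ¬ n < 3), fibPair_eq]
  have hmod : PySem.Int.mod n 2 = ((n.toNat % 2 : Nat) : Int) := by
    rw [PySem.Int.mod_eq_emod_of_pos (by norm_num)]; omega
  rw [hmod]
  dsimp only
  rcases Nat.mod_two_eq_zero_or_one n.toNat with hp | hp
  · rw [hp, negFib_even _ hp]; norm_num
  · rw [hp, negFib_odd _ hp]; norm_num

-- ===== VERDICT (by name: the statement is the Claim_ definition above) =====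
theorem NegativeFibonacci_spec : Claim_equal_NegativeFibonacci := by
  intro n _
  show NegativeFibonacci n = NegativeFibonacci_alt n
  by_cases h3 : n < 3
  · by_cases h1 : n = 1
    · subst h1; decide
    · by_cases h2 : n = 2
      · subst h2; decide
      · rw [alt_eval, if_pos h3, if_neg (by simp only [beq_iff_eq]; omega : ¬ (n == 1) = true)]
        unfold NegativeFibonacci
        rw [if_neg (by simp only [beq_iff_eq]; omega), if_neg (by simp only [beq_iff_eq]; omega),
           PySem.List.pyRange_one_eq_nil (by omega)]
        rfl
  · rw [A_eq_negFib n (by omega), B_eq_negFib n (by omega)]
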